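-- pv_equiv track=rewrite | github.com/collinear-ai/simlab | src/simlab/cli/autoresearch.py | _provider_env_prefix
-- ===== SOURCE A (Python) =====
-- def _provider_env_prefix(provider: str) -> str:
--     provider = (provider or "").strip()
--     if not provider:
--         return "PROVIDER"
--     cleaned: list[str] = []
--     for ch in provider.upper():
--         if ch.isalnum():
--             cleaned.append(ch)
--         else:
--             cleaned.append("_")
--     prefix = "".join(cleaned)
--     while "__" in prefix:
--         prefix = prefix.replace("__", "_")
--     prefix = prefix.strip("_")
--     return prefix or "PROVIDER"
-- ===== SOURCE B (Python) =====
-- def _provider_env_prefix(provider: str) -> str: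
--     provider = (provider or "").strip()
--     out: list[str] = []
--     prev_us = True  # suppress a leading underscore
--     for ch in provider.upper():
--         if ch.isalnum():
--             out.append(ch)
--             prev_us = False
--         elif not prev_us:
--             out.append("_")
--             prev_us = True
--     if out and out[-1] == "_":
--         out.pop()
--     return "".join(out) or "PROVIDER"
-- ===== Notes on version B (the rewrite author's own statement) =====
-- stated objective: simpler
-- what changed: Replaced the build-then-repeatedly-collapse-then-strip pipeline (map every char, loop a global double-underscore replace to a fixpoint, strip underscores from both ends) by a single stateful pass that emits at most one separator underscore between alphanumeric runs, suppressing a leading one and popping at most one trailing one.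
import Mathlib
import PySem

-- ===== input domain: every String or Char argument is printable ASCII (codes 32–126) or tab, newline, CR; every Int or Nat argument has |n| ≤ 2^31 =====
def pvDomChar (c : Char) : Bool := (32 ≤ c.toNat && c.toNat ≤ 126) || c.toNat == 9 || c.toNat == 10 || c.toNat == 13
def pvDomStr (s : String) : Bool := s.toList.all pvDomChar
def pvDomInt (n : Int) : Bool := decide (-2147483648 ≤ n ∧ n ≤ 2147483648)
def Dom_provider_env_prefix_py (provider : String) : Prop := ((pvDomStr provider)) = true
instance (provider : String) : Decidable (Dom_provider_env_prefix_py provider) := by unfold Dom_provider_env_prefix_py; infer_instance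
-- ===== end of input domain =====

-- B replaces A's build-map / repeated replace("__","_") / strip("_") pipeline by one stateful pass
-- (flag: last emitted char was an underscore), popping at most one trailing underscore: simpler, one traversal.


-- ===== PORT A =====
-- A's `while "__" in prefix: prefix = prefix.replace("__", "_")` loop, made total with fuel;
-- fuel = length suffices because each replace strictly shortens the list while "__" occurs.
def pvCollapseLoop : Nat → List Char → List Char
  | 0, p => p
  | fuel + 1, p =>
    if PySem.Chars.isIn ['_', '_'] p then
      pvCollapseLoop fuel (PySem.Chars.replace p ['_', '_'] ['_'])
    else p

def provider_env_prefix_py (provider : String) : String :=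
  -- provider = (provider or "").strip()
  let p := PySem.Chars.strip (if provider.toList = [] then [] else provider.toList)
  -- if not provider: return "PROVIDER"
  if p = [] then "PROVIDER"
  else
    -- cleaned: append ch if ch.isalnum() else "_", for ch in provider.upper()
    let cleaned := (PySem.Chars.upper p).foldl
      (fun acc ch => acc ++ [if PySem.Chars.isalnum ch then ch else '_']) []
    -- while "__" in prefix: prefix = prefix.replace("__", "_")
    let pre := pvCollapseLoop cleaned.length cleaned
    -- prefix = prefix.strip("_")
    let pre2 := PySem.Chars.stripChars pre ['_']
    -- return prefix or "PROVIDER"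
    if pre2 = [] then "PROVIDER" else String.ofList pre2

-- ===== PORT B =====
-- the single pass: out = accumulated chars, prevUs = last emitted was an underscore (True initially)
def pvBLoop : List Char → List Char → Bool → List Char
  | [], out, _ => out
  | ch :: t, out, prevUs =>
    if PySem.Chars.isalnum ch then pvBLoop t (out ++ [ch]) false
    else if !prevUs then pvBLoop t (out ++ ['_']) true
    else pvBLoop t out prevUs

def provider_env_prefix_py_alt (provider : String) : String :=
  -- provider = (provider or "").strip()
  let p := PySem.Chars.strip (if provider.toList = [] then [] else provider.toList)
  let out := pvBLoop (PySem.Chars.upper p) [] true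
  -- if out and out[-1] == "_": out.pop()
  let out2 := if out ≠ [] ∧ out.getLast? = some '_' then out.dropLast else out
  -- return "".join(out) or "PROVIDER"
  if out2 = [] then "PROVIDER" else String.ofList out2

-- ===== PRECONDITION & SPEC =====
def Spec_provider_env_prefix_py (provider : String) (out : String) : Prop := out = provider_env_prefix_py_alt provider
instance (provider : String) (out : String) : Decidable (Spec_provider_env_prefix_py provider out) := by unfold Spec_provider_env_prefix_py; infer_instance

-- ===== CLAIM (what is proved, stated in full; the proofs are below) =====
def Claim_equal_provider_env_prefix_py : Prop := ∀ (provider : String), Dom_provider_env_prefix_py provider → Spec_provider_env_prefix_py provider (provider_env_prefix_py provider)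

-- ===== LEMMAS AND PROOFS =====

-- Python's str.replace("__", "_") (left-to-right, non-overlapping), directly on the list
def pvRep : List Char → List Char
  | a :: b :: t => if a == '_' && b == '_' then '_' :: pvRep t else a :: pvRep (b :: t)
  | l => l

-- "contains a double underscore"
def pvDD : List Char → Bool
  | a :: b :: t => (a == '_' && b == '_') || pvDD (b :: t)
  | _ => false

-- collapse runs of '_' to a single '_', with a prev-emitted-underscore flag
def pvSq : List Char → Bool → List Char
  | [], _ => []
  | c :: t, prev =>
    if c == '_' then (if prev then pvSq t true else '_' :: pvSq t true)
    else c :: pvSq t false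

-- accumulator-free form of pvBLoop
def pvBFun : List Char → Bool → List Char
  | [], _ => []
  | ch :: t, prev =>
    if PySem.Chars.isalnum ch then ch :: pvBFun t false
    else if !prev then '_' :: pvBFun t true
    else pvBFun t prev

lemma pvBLoop_eq (l : List Char) : ∀ (out : List Char) (prev : Bool),
    pvBLoop l out prev = out ++ pvBFun l prev := by
  induction l with
  | nil => intro out prev; simp [pvBLoop, pvBFun]
  | cons c t ih =>
    intro out prev
    by_cases h : PySem.Chars.isalnum c = true
    · simp [pvBLoop, pvBFun, h, ih]
    · cases prev <;> simp [pvBLoop, pvBFun, h, ih]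

lemma pvRep_len_le : ∀ (l : List Char), (pvRep l).length ≤ l.length
  | [] => le_rfl
  | [c] => le_rfl
  | a :: b :: t => by
    have e : pvRep (a :: b :: t)
        = if a == '_' && b == '_' then '_' :: pvRep t else a :: pvRep (b :: t) := rfl
    by_cases hab : (a == '_' && b == '_') = true
    · have := pvRep_len_le t
      simp [e, hab]; omega
    · have hab' : (a == '_' && b == '_') = false := by simpa using hab
      have := pvRep_len_le (b :: t)
      simp only [e, hab', if_false, Bool.false_eq_true, List.length_cons] at *
      omega

lemma pvRep_len_lt : ∀ (l : List Char), pvDD l = true → (pvRep l).length < l.length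
  | [], h => by exact absurd h (by simp [pvDD])
  | [c], h => by exact absurd h (by have : pvDD [c] = false := rfl; simp [this])
  | a :: b :: t, h => by
    have e : pvRep (a :: b :: t)
        = if a == '_' && b == '_' then '_' :: pvRep t else a :: pvRep (b :: t) := rfl
    have edd : pvDD (a :: b :: t) = ((a == '_' && b == '_') || pvDD (b :: t)) := rfl
    by_cases hab : (a == '_' && b == '_') = true
    · have := pvRep_len_le t
      simp [e, hab]; omega
    · have hab' : (a == '_' && b == '_') = false := by simpa using hab
      have hdd : pvDD (b :: t) = true := by
        rw [edd, hab'] at h; simpa using h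
      have := pvRep_len_lt (b :: t) hdd
      simp only [e, hab', if_false, Bool.false_eq_true, List.length_cons] at *
      omega

lemma pvReplaceGo_eq : ∀ (fuel : Nat) (l acc : List Char), l.length ≤ fuel →
    PySem.Chars.replace.go ['_', '_'] ['_'] fuel l acc = acc.reverse ++ pvRep l := by
  intro fuel
  induction fuel with
  | zero =>
    intro l acc hl
    have : l = [] := by cases l <;> simp_all
    subst this; simp [PySem.Chars.replace.go, pvRep]
  | succ fuel ih =>
    intro l acc hl
    match l with
    | [] => simp [PySem.Chars.replace.go, pvRep]
    | [c] =>
      have hpre : List.isPrefixOf ['_', '_'] [c] = false := by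
        simp [List.isPrefixOf]
      simp only [PySem.Chars.replace.go, hpre, Bool.false_eq_true, if_false]
      rw [ih [] (c :: acc) (by simp)]
      have : pvRep [c] = [c] := rfl
      have h0 : pvRep ([] : List Char) = [] := rfl
      simp [this, h0]
    | a :: b :: t =>
      by_cases hab : a = '_' ∧ b = '_'
      · obtain ⟨rfl, rfl⟩ := hab
        have hpre : List.isPrefixOf ['_', '_'] ('_' :: '_' :: t) = true := by
          simp [List.isPrefixOf]
        simp only [PySem.Chars.replace.go, hpre, if_true]
        rw [show List.drop (['_', '_'] : List Char).length ('_' :: '_' :: t) = t from rfl,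
            show (['_'] : List Char).reverse ++ acc = '_' :: acc from rfl]
        rw [ih t ('_' :: acc) (by simp at hl ⊢; omega)]
        have e : pvRep ('_' :: '_' :: t) = '_' :: pvRep t := by simp [pvRep]
        simp [e]
      · have hpre : List.isPrefixOf ['_', '_'] (a :: b :: t) = false := by
          simp [List.isPrefixOf]
          intro ha hb; exact hab ⟨ha.symm, hb.symm⟩
        simp only [PySem.Chars.replace.go, hpre, Bool.false_eq_true, if_false]
        rw [ih (b :: t) (a :: acc) (by simp at hl ⊢; omega)]
        have hab' : (a == '_' && b == '_') = false := by
          simp; intro ha hb; exact hab ⟨ha, hb⟩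
        have e : pvRep (a :: b :: t) = a :: pvRep (b :: t) := by
          rw [show pvRep (a :: b :: t)
              = if a == '_' && b == '_' then '_' :: pvRep t else a :: pvRep (b :: t) from rfl,
            hab']
          simp
        rw [e]; simp

lemma pvReplace_eq (l : List Char) :
    PySem.Chars.replace l ['_', '_'] ['_'] = pvRep l := by
  rw [PySem.Chars.replace]
  simp only [List.isEmpty_cons, Bool.false_eq_true, if_false]
  rw [pvReplaceGo_eq l.length l [] le_rfl]
  simp

lemma pvDD_iff_infix (l : List Char) : pvDD l = true ↔ ['_', '_'] <:+: l := by
  induction l with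
  | nil => simp [pvDD]
  | cons c t ih =>
    match t with
    | [] =>
      have e : pvDD [c] = false := rfl
      rw [e]
      constructor
      · intro hf; cases hf
      intro hinf
      exfalso
      have := hinf.length_le
      simp at this
    | d :: t' =>
      rw [List.infix_cons_iff]
      constructor
      · intro h
        simp [pvDD] at h
        rcases h with ⟨rfl, rfl⟩ | h
        · left; exact ⟨t', rfl⟩
        · right; exact (ih).mp (by exact h)
      · rintro (h | h)
        · rw [List.cons_prefix_cons] at h
          obtain ⟨rfl, h⟩ := h
          rw [List.cons_prefix_cons] at h
          obtain ⟨rfl, -⟩ := h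
          simp [pvDD]
        · have := ih.mpr h
          simp [pvDD] at this ⊢; tauto

lemma pvIsIn_eq_dd (l : List Char) : PySem.Chars.isIn ['_', '_'] l = pvDD l := by
  cases h : pvDD l
  · exact (PySem.Chars.isIn_eq_false_iff _ _).mpr (fun hc => by
      have := (pvDD_iff_infix l).mpr hc
      exact absurd this (by simp [h]))
  · exact (PySem.Chars.isIn_iff_infix _ _).mpr ((pvDD_iff_infix l).mp h)

lemma pvSq_rep (l : List Char) : ∀ prev, pvSq (pvRep l) prev = pvSq l prev := by
  fun_induction pvRep l with
  | case1 a b t h ih =>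
    intro prev
    simp at h; obtain ⟨rfl, rfl⟩ := h
    cases prev <;> simp [pvSq, ih]
  | case2 a b t h ih =>
    intro prev
    by_cases ha : a = '_'
    · subst ha
      cases prev <;> simp [pvSq, ih]
    · have ha' : (a == '_') = false := by simp [ha]
      cases prev <;> simp [pvSq, ha', ih]
  | case3 l h => intro prev; rfl

lemma pvSq_id : ∀ (l : List Char), pvDD l = false →
    pvSq l false = l ∧ (l.head? ≠ some '_' → pvSq l true = l)
  | [], _ => by simp [pvSq]
  | c :: t, h => by
    have hdd : pvDD t = false := by
      match t with
      | [] => rfl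
      | d :: t' =>
        have e : pvDD (c :: d :: t') = ((c == '_' && d == '_') || pvDD (d :: t')) := rfl
        rw [e] at h; simp at h; exact h.2
    obtain ⟨ih1, ih2⟩ := pvSq_id t hdd
    by_cases hc : c = '_'
    · subst hc
      refine ⟨?_, by intro hh; simp at hh⟩
      have hht : t.head? ≠ some '_' := by
        match t with
        | [] => simp
        | d :: t' =>
          have e : pvDD ('_' :: d :: t') = (('_' == '_' && d == '_') || pvDD (d :: t')) := rfl
          rw [e] at h
          simp at h ⊢
          exact h.1
      simp [pvSq, ih2 hht]
    · have hc' : (c == '_') = false := by simp [hc]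
      exact ⟨by simp [pvSq, hc', ih1], fun _ => by simp [pvSq, hc', ih1]⟩

lemma pvCollapse_eq : ∀ (fuel : Nat) (l : List Char), l.length ≤ fuel →
    pvCollapseLoop fuel l = pvSq l false := by
  intro fuel
  induction fuel with
  | zero =>
    intro l hl
    have : l = [] := by cases l <;> simp_all
    subst this; simp [pvCollapseLoop, pvSq]
  | succ fuel ih =>
    intro l hl
    cases hdd : pvDD l
    · simp [pvCollapseLoop, pvIsIn_eq_dd, hdd, (pvSq_id l hdd).1]
    · simp only [pvCollapseLoop, pvIsIn_eq_dd, hdd, if_true]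
      rw [pvReplace_eq]
      rw [ih (pvRep l) (by have := pvRep_len_lt l hdd; omega)]
      exact pvSq_rep l false

lemma pvIsalnum_ne_underscore {c : Char} (h : PySem.Chars.isalnum c = true) : c ≠ '_' := by
  rintro rfl; exact absurd h (by decide)

lemma pvBFun_eq_sq (l : List Char) : ∀ prev,
    pvBFun l prev = pvSq (l.map (fun ch => if PySem.Chars.isalnum ch then ch else '_')) prev := by
  induction l with
  | nil => intro prev; simp [pvBFun, pvSq]
  | cons c t ih =>
    intro prev
    by_cases h : PySem.Chars.isalnum c = true
    · have hne : (c == '_') = false := by simp [pvIsalnum_ne_underscore h]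
      simp [pvBFun, pvSq, h, hne, ih]
    · cases prev <;> simp [pvBFun, pvSq, h, ih]

lemma pvSq_true_head (l : List Char) : (pvSq l true).head? ≠ some '_' := by
  induction l with
  | nil => simp [pvSq]
  | cons c t ih =>
    by_cases hc : (c == '_') = true
    · simpa [pvSq, hc] using ih
    · simp at hc
      simp [pvSq, hc]

lemma pvDD_sq (l : List Char) : ∀ prev, pvDD (pvSq l prev) = false := by
  induction l with
  | nil => intro prev; simp [pvSq, pvDD]
  | cons c t ih =>
    intro prev
    by_cases hc : (c == '_') = true
    · cases prev
      · simp only [pvSq, hc, if_true, Bool.false_eq_true, if_false]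
        cases hsq : pvSq t true with
        | nil => simp [pvDD]
        | cons d r =>
          have hd : d ≠ '_' := by
            have := pvSq_true_head t; rw [hsq] at this; simpa using this
          have : pvDD (d :: r) = false := by rw [← hsq]; exact ih true
          simp [pvDD, hd, this]
      · simp only [pvSq, hc, if_true]
        exact ih true
    · simp at hc
      simp only [pvSq, beq_iff_eq, hc, if_false]
      cases hsq : pvSq t false with
      | nil => simp [pvDD]
      | cons d r =>
        have : pvDD (d :: r) = false := by rw [← hsq]; exact ih false
        simp [pvDD, hc, this]

lemma pvSq_true_eq_drop (l : List Char) :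
    pvSq l true = List.dropWhile (fun c => c == '_') (pvSq l false) := by
  cases l with
  | nil => simp [pvSq]
  | cons c t =>
    by_cases hc : (c == '_') = true
    · simp only [pvSq, hc, if_true, Bool.false_eq_true, if_false, List.dropWhile_cons]
      cases hsq : pvSq t true with
      | nil => simp
      | cons d r =>
        have hd : d ≠ '_' := by
          have := pvSq_true_head t; rw [hsq] at this; simpa using this
        simp [hd]
    · simp [pvSq, hc]

lemma pvDD_snoc : ∀ (l : List Char) (c : Char),
    pvDD (l ++ [c]) = (pvDD l || (l.getLast? == some '_' && c == '_'))
  | [], c => by simp [pvDD]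
  | [a], c => by
    have e1 : pvDD ([a] ++ [c]) = ((a == '_' && c == '_') || pvDD [c]) := rfl
    have e2 : pvDD [c] = false := rfl
    have e3 : pvDD [a] = false := rfl
    rw [e1, e2, e3]; simp
  | a :: b :: l'', c => by
    have e1 : pvDD ((a :: b :: l'') ++ [c])
        = ((a == '_' && b == '_') || pvDD ((b :: l'') ++ [c])) := rfl
    have e2 : pvDD (a :: b :: l'') = ((a == '_' && b == '_') || pvDD (b :: l'')) := rfl
    rw [e1, pvDD_snoc (b :: l'') c, e2]
    simp [List.getLast?_cons_cons, Bool.or_assoc]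

lemma pvRstrip_pop (w : List Char) (h : pvDD w = false) :
    (List.dropWhile (fun c => c == '_') w.reverse).reverse
      = if w.getLast? = some '_' then w.dropLast else w := by
  induction w using List.reverseRecOn with
  | nil => simp
  | append_singleton l c _ =>
    by_cases hc : c = '_'
    · subst hc
      rw [pvDD_snoc] at h
      simp only [beq_self_eq_true, Bool.and_true, Bool.or_eq_false_iff] at h
      have hlast : (l.getLast? == some '_') = false := h.2
      have hdl : List.dropWhile (fun c => c == '_') l.reverse = l.reverse := by
        cases hr : l.reverse with
        | nil => rfl
        | cons d r =>
          have hdlast : l.getLast? = some d := by rw [← List.head?_reverse, hr]; rfl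
          have hd : (d == '_') = false := by
            rw [hdlast] at hlast; simpa using hlast
          simp [hd]
      rw [List.reverse_append]
      simp only [List.reverse_cons, List.reverse_nil, List.nil_append, List.singleton_append,
        List.dropWhile_cons, beq_self_eq_true, if_true]
      rw [hdl, List.reverse_reverse, List.getLast?_concat]
      simp
    · have hc' : (c == '_') = false := by simp [hc]
      rw [List.reverse_append]
      simp only [List.reverse_cons, List.reverse_nil, List.nil_append, List.singleton_append,
        List.dropWhile_cons, hc', Bool.false_eq_true, if_false]
      rw [List.reverse_reverse, List.getLast?_concat]
      simp [hc]

lemma pvContains_underscore : (fun c => List.contains ['_'] c) = (fun c : Char => c == '_') := by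
  funext c
  simp only [List.contains_cons, List.contains_nil, Bool.or_false]

-- ===== VERDICT (by name: the statement is the Claim_ definition above) =====
theorem provider_env_prefix_py_spec : Claim_equal_provider_env_prefix_py := by
  intro provider _
  unfold Spec_provider_env_prefix_py provider_env_prefix_py provider_env_prefix_py_alt
  set p := PySem.Chars.strip (if provider.toList = [] then [] else provider.toList) with hp
  by_cases hpe : p = []
  · simp [hpe, PySem.Chars.upper, pvBLoop]
  · simp only [hpe, if_false]
    set u := PySem.Chars.upper p with hu
    set f : Char → Char := fun ch => if PySem.Chars.isalnum ch then ch else '_' with hf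
    have hclean : u.foldl (fun acc ch => acc ++ [f ch]) [] = u.map f :=
      PySem.List.foldl_append_singleton_eq_map f u []
    rw [hclean]
    set m := u.map f with hm
    rw [pvCollapse_eq m.length m le_rfl]
    rw [pvBLoop_eq, pvBFun_eq_sq]
    simp only [List.nil_append]
    rw [← hm]
    -- A's stripChars = lstrip then rstrip of underscores
    have hstrip : PySem.Chars.stripChars (pvSq m false) ['_']
        = (List.dropWhile (fun c => c == '_') (List.dropWhile (fun c => c == '_') (pvSq m false)).reverse).reverse := by
      rw [PySem.Chars.stripChars, pvContains_underscore]
    rw [hstrip, ← pvSq_true_eq_drop]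
    rw [pvRstrip_pop (pvSq m true) (pvDD_sq m true)]
    -- B's pop condition equals the getLast? test
    by_cases hl : (pvSq m true).getLast? = some '_'
    · have hne : pvSq m true ≠ [] := by
        intro he; rw [he] at hl; simp at hl
      simp [hl, hne]
    · simp [hl]
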